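-- pv_equiv track=rewrite | github.com/savad/data_structure_practice | codility/palindrome_re-order-and-remove.py | remove_char
-- ===== SOURCE A (Python) =====
-- from collections import defaultdict
--
-- def remove_char(A):
--     hmap = defaultdict(int)
--     for i in range(len(A)):
--         hmap[A[i]] += 1
--     oddCount = 0
--     for x in hmap:
--         if hmap[x] % 2 != 0:
--             oddCount += 1
--             oddChar = x
--
--     if (oddCount > 1 or oddCount == 1 and len(A) % 2 == 0):
--         A = A.replace(oddChar, "", 1)
--         return remove_char(A)
--     firstHalf = ""
--     secondHalf = ""
--
--     for x in sorted(hmap.keys()):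
--         s = (hmap[x] // 2) * x
--         firstHalf = firstHalf + s
--         secondHalf = s + secondHalf
--
--     if (oddCount == 1):
--         return (firstHalf + oddChar + secondHalf)
--     else:
--         return (firstHalf + secondHalf)
-- ===== SOURCE B (Python) =====
-- from collections import Counter
--
-- def remove_char(A):
--     counts = Counter(A)
--     center = next((c for c in A if counts[c] % 2 == 1), "")
--     half = "".join(c * (counts[c] // 2) for c in sorted(counts))
--     return half + center + "".join(reversed(half))
-- ===== Notes on version B (the rewrite author's own statement) =====
-- stated objective: faster
-- what changed: A repeatedly rescans and rebuilds the string (one recursive pass with a linear replace per odd character); B does a single frequency count, picks the first character of the string whose count is odd as the center, and builds the half from sorted counts once, so the repeated rescan/recursion disappears.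
import Mathlib
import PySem

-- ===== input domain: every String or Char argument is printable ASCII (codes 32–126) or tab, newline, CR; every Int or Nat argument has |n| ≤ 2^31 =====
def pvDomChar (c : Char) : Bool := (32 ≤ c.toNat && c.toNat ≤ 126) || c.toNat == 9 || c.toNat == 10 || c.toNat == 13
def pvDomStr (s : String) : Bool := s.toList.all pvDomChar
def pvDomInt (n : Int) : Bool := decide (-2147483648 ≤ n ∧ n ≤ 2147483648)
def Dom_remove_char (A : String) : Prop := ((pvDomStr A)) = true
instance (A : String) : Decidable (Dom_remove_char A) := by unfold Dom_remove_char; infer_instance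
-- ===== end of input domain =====

-- B replaces A's quadratic remove-and-recurse loop by one frequency count: the center is the
-- first character of the string whose count is odd, and the halves are built once from sorted counts.

-- ===== PORT A =====
-- hmap = defaultdict(int); for i in range(len(A)): hmap[A[i]] += 1   (the loop visits the characters in order)
def pvHmapA (cs : List Char) : PySem.Dict Char Int :=
  cs.foldl (fun d c => d.modify c 0 (· + 1)) PySem.Dict.empty

-- oddCount = 0; for x in hmap: if hmap[x] % 2 != 0: oddCount += 1; oddChar = x
def pvOddA (cs : List Char) : Int × Option Char :=
  (pvHmapA cs).keys.foldl
    (fun s x => if PySem.Int.mod ((pvHmapA cs).getD x 0) 2 ≠ 0 then (s.1 + 1, some x) else s)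
    (0, none)

-- firstHalf/secondHalf loop: for x in sorted(hmap.keys()): s = (hmap[x] // 2) * x; firstHalf += s; secondHalf = s + secondHalf
def pvHalvesA (cs : List Char) : List Char × List Char :=
  (PySem.List.sorted (pvHmapA cs).keys (fun x => x)).foldl
    (fun fsh x =>
      (fsh.1 ++ PySem.List.pyRepeat [x] (PySem.Int.floordiv ((pvHmapA cs).getD x 0) 2),
       PySem.List.pyRepeat [x] (PySem.Int.floordiv ((pvHmapA cs).getD x 0) 2) ++ fsh.2))
    ([], [])

-- termination helper: if the odd-count fold produced `some c`, then c came from the list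
lemma pvFoldSndMem (q : Char → Prop) [DecidablePred q] :
    ∀ (l : List Char) (n : Int) (oc : Option Char) (c : Char),
      (l.foldl (fun s x => if q x then (s.1 + 1, some x) else s) (n, oc)).2 = some c →
      oc = some c ∨ c ∈ l := by
  intro l
  induction l with
  | nil => intro n oc c h; simp at h; exact Or.inl h
  | cons x t ih =>
    intro n oc c h
    simp only [List.foldl_cons] at h
    by_cases hx : q x
    · rw [if_pos hx] at h
      rcases ih _ _ _ h with h' | h'
      · exact Or.inr (by simp at h'; simp [h'])
      · exact Or.inr (List.mem_cons_of_mem _ h')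
    · rw [if_neg hx] at h
      rcases ih _ _ _ h with h' | h'
      · exact Or.inl h'
      · exact Or.inr (List.mem_cons_of_mem _ h')

lemma pvOddA_snd_mem (cs : List Char) (c : Char) (h : (pvOddA cs).2 = some c) : c ∈ cs := by
  rcases pvFoldSndMem _ _ _ _ _ h with h' | h'
  · exact absurd h' (by simp)
  · have hk : pvHmapA cs = PySem.Dict.counter cs := (PySem.Dict.counter_eq_foldl cs).symm
    rw [hk, PySem.Dict.keys_counter] at h'
    exact (PySem.Set.mem_ofList cs c).1 h'

-- the recursion of A: if more than the allowed number of odd counts, drop the first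
-- occurrence of oddChar (A.replace(oddChar, "", 1) = List.erase) and recurse
def removeCharGo (cs : List Char) : List Char :=
  if 1 < (pvOddA cs).1 ∨ ((pvOddA cs).1 = 1 ∧ PySem.Int.mod (cs.length : Int) 2 = 0) then
    match h2 : (pvOddA cs).2 with
    | some c => removeCharGo (cs.erase c)
    | none => []  -- unreachable: in this branch oddCount ≥ 1, so oddChar was assigned
  else
    if (pvOddA cs).1 = 1 then
      (pvHalvesA cs).1 ++ (match (pvOddA cs).2 with | some c => [c] | none => []) ++ (pvHalvesA cs).2
    else
      (pvHalvesA cs).1 ++ (pvHalvesA cs).2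
termination_by cs.length
decreasing_by
  have hc : c ∈ cs := pvOddA_snd_mem cs c h2
  have h1 := List.length_erase_of_mem hc
  have hp := List.length_pos_of_mem hc
  omega

def remove_char (A : String) : String := String.mk (removeCharGo A.toList)

-- ===== PORT B =====
def removeCharAltGo (cs : List Char) : List Char :=
  let counts := PySem.Dict.counter cs
  let center := match cs.find? (fun c => PySem.Int.mod (counts.getD c 0) 2 == 1) with
    | some c => [c]
    | none => []
  let half := (PySem.List.sorted counts.keys (fun x => x)).flatMap
    (fun c => PySem.List.pyRepeat [c] (PySem.Int.floordiv (counts.getD c 0) 2))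
  half ++ center ++ half.reverse

def remove_char_alt (A : String) : String := String.mk (removeCharAltGo A.toList)

-- ===== PRECONDITION & SPEC =====
def Spec_remove_char (A : String) (out : String) : Prop := out = remove_char_alt A
instance (A : String) (out : String) : Decidable (Spec_remove_char A out) := by unfold Spec_remove_char; infer_instance

-- ===== CLAIM (what is proved, stated in full; the proofs are below) =====
def Claim_equal_remove_char : Prop := ∀ (A : String), Dom_remove_char A → Spec_remove_char A (remove_char A)

-- ===== LEMMAS AND PROOFS =====

-- proof-side vocabulary
def pvOddP (cs : List Char) : Char → Bool := fun x => cs.count x % 2 == 1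
def pvOdds (cs : List Char) : List Char := (PySem.Set.ofList cs).filter (pvOddP cs)
def pvRep (cs : List Char) : Char → List Char := fun c => List.replicate (cs.count c / 2) c
def pvHalf (cs : List Char) : List Char :=
  (PySem.List.sorted (PySem.Set.ofList cs) (fun x => x)).flatMap (pvRep cs)
def pvCenter (cs : List Char) : List Char :=
  match cs.find? (pvOddP cs) with | some c => [c] | none => []

lemma pvMod2 (n : Nat) : PySem.Int.mod (n : Int) 2 = ((n % 2 : Nat) : Int) := by
  rw [show ((2:Int)) = ((2:Nat):Int) by norm_num, PySem.Int.mod_natCast]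

lemma pvDiv2 (n : Nat) : PySem.Int.floordiv (n : Int) 2 = ((n / 2 : Nat) : Int) := by
  rw [show ((2:Int)) = ((2:Nat):Int) by norm_num, PySem.Int.floordiv_natCast]

lemma pvPairFold (q : Char → Prop) [DecidablePred q] :
    ∀ (l : List Char) (n : Int) (oc : Option Char),
      List.foldl (fun s x => if q x then (s.1 + 1, some x) else s) (n, oc) l
      = (n + ((l.filter (fun x => decide (q x))).length : Int),
         ((l.filter (fun x => decide (q x))).getLast?).or oc) := by
  intro l
  induction l with
  | nil => intro n oc; simp
  | cons x t ih =>
    intro n oc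
    by_cases h : q x
    · rw [List.foldl_cons, if_pos h, ih, List.filter_cons_of_pos (by simpa using h)]
      rw [Prod.mk.injEq]
      refine ⟨by simp only [List.length_cons]; push_cast; ring, ?_⟩
      cases hft : t.filter (fun x => decide (q x)) with
      | nil => simp
      | cons y ys =>
        rw [List.getLast?_cons_cons]
        obtain ⟨z, hz⟩ : ∃ z, (y :: ys).getLast? = some z :=
          ⟨_, List.getLast?_eq_some_getLast (by simp)⟩
        simp [hz]
    · rw [List.foldl_cons, if_neg h, ih, List.filter_cons_of_neg (by simpa using h)]

lemma pvOddA_eq (cs : List Char) :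
    pvOddA cs = (((pvOdds cs).length : Int), (pvOdds cs).getLast?) := by
  have hk : pvHmapA cs = PySem.Dict.counter cs := (PySem.Dict.counter_eq_foldl cs).symm
  have hf : ((pvHmapA cs).keys.filter (fun x => decide (PySem.Int.mod ((pvHmapA cs).getD x 0) 2 ≠ 0))) = pvOdds cs := by
    rw [hk, PySem.Dict.keys_counter]
    unfold pvOdds
    congr 1
    funext x
    rw [PySem.Dict.getD_counter, pvMod2]
    rcases Nat.mod_two_eq_zero_or_one (cs.count x) with h | h <;> simp [pvOddP, h]
  have h1 := pvPairFold (fun x => PySem.Int.mod ((pvHmapA cs).getD x 0) 2 ≠ 0) ((pvHmapA cs).keys) 0 none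
  refine h1.trans ?_
  rw [hf, Option.or_none, zero_add]

lemma pvPrependFold (g : Char → List Char) (hg : ∀ x, (g x).reverse = g x) :
    ∀ (l : List Char) (acc : List Char),
      List.foldl (fun a x => g x ++ a) acc l = (l.flatMap g).reverse ++ acc := by
  intro l
  induction l with
  | nil => intro acc; simp
  | cons x t ih =>
    intro acc
    rw [List.foldl_cons, ih, List.flatMap_cons, List.reverse_append, hg]
    simp [List.append_assoc]

lemma pvHalvesA_eq (cs : List Char) : pvHalvesA cs = (pvHalf cs, (pvHalf cs).reverse) := by
  have hk : pvHmapA cs = PySem.Dict.counter cs := (PySem.Dict.counter_eq_foldl cs).symm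
  have hg : ∀ x : Char, (PySem.List.pyRepeat [x] (PySem.Int.floordiv ((pvHmapA cs).getD x 0) 2)).reverse
      = PySem.List.pyRepeat [x] (PySem.Int.floordiv ((pvHmapA cs).getD x 0) 2) := by
    intro x
    rw [PySem.List.pyRepeat_singleton]
    exact List.reverse_replicate ..
  have hfun : (fun x => PySem.List.pyRepeat [x] (PySem.Int.floordiv ((pvHmapA cs).getD x 0) 2)) = pvRep cs := by
    funext x
    rw [hk, PySem.Dict.getD_counter, pvDiv2, PySem.List.pyRepeat_singleton]
    simp only [pvRep]
    congr 1
  unfold pvHalvesA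
  rw [PySem.List.foldl_prod_mk
      (f := fun a x => a ++ PySem.List.pyRepeat [x] (PySem.Int.floordiv ((pvHmapA cs).getD x 0) 2))
      (g := fun b x => PySem.List.pyRepeat [x] (PySem.Int.floordiv ((pvHmapA cs).getD x 0) 2) ++ b)]
  rw [PySem.List.foldl_append_eq_flatMap, pvPrependFold _ hg]
  rw [hfun, hk, PySem.Dict.keys_counter]
  simp [pvHalf]

lemma pvAltGo_eq (cs : List Char) :
    removeCharAltGo cs = pvHalf cs ++ pvCenter cs ++ (pvHalf cs).reverse := by
  have hfun : (fun c => PySem.List.pyRepeat [c] (PySem.Int.floordiv ((PySem.Dict.counter cs).getD c 0) 2)) = pvRep cs := by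
    funext x
    rw [PySem.Dict.getD_counter, pvDiv2, PySem.List.pyRepeat_singleton]
    simp only [pvRep]
    congr 1
  have hp : (fun c => (PySem.Int.mod ((PySem.Dict.counter cs).getD c 0) 2 == 1)) = pvOddP cs := by
    funext x
    rw [PySem.Dict.getD_counter, pvMod2]
    rcases Nat.mod_two_eq_zero_or_one (cs.count x) with h | h <;> simp [pvOddP, h]
  simp only [removeCharAltGo]
  rw [hfun, hp, PySem.Dict.keys_counter]
  rfl

lemma pvFoldlAddFilterOfMem (x : Char) :
    ∀ (t acc : List Char), x ∈ acc →
      t.foldl PySem.Set.add acc = (t.filter (fun y => y != x)).foldl PySem.Set.add acc := by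
  intro t
  induction t with
  | nil => intro acc hx; simp
  | cons y s ih =>
    intro acc hx
    by_cases hyx : y = x
    · subst hyx
      rw [List.filter_cons_of_neg (by simp), List.foldl_cons]
      have hadd : PySem.Set.add acc y = acc := by
        simp [PySem.Set.add, hx]
      rw [hadd]
      exact ih acc hx
    · rw [List.filter_cons_of_pos (by simp [hyx]), List.foldl_cons, List.foldl_cons]
      refine ih _ ?_
      simp only [PySem.Set.add]
      split
      · exact hx
      · exact List.mem_append_left _ hx

lemma pvFoldlAddConsOfNe (x : Char) :
    ∀ (s a : List Char), (∀ y ∈ s, y ≠ x) →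
      s.foldl PySem.Set.add (x :: a) = x :: s.foldl PySem.Set.add a := by
  intro s
  induction s with
  | nil => intro a h; simp
  | cons y s ih =>
    intro a h
    have hyx : y ≠ x := h y (by simp)
    rw [List.foldl_cons, List.foldl_cons]
    have hstep : PySem.Set.add (x :: a) y = x :: PySem.Set.add a y := by
      have hcc : PySem.Set.contains (x :: a) y = PySem.Set.contains a y := by
        show ((x :: a).contains y) = (a.contains y)
        simp [hyx]
      simp only [PySem.Set.add, hcc]
      split
      · rfl
      · rfl
    rw [hstep]
    exact ih _ (fun z hz => h z (by simp [hz]))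

lemma pvOfListCons (x : Char) (t : List Char) :
    PySem.Set.ofList (x :: t) = x :: PySem.Set.ofList (t.filter (fun y => y != x)) := by
  rw [PySem.Set.ofList_eq_foldl, PySem.Set.ofList_eq_foldl, List.foldl_cons]
  have h0 : PySem.Set.add ([] : List Char) x = [x] := rfl
  rw [h0, pvFoldlAddFilterOfMem x t [x] (by simp)]
  refine pvFoldlAddConsOfNe x _ [] ?_
  intro y hy
  have hmem := (List.mem_filter.1 hy).2
  simpa using hmem

lemma pvFindFilterNe (p : Char → Bool) (x : Char) (hx : p x = false) :
    ∀ t : List Char, (t.filter (fun y => y != x)).find? p = t.find? p := by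
  intro t
  induction t with
  | nil => simp
  | cons y s ih =>
    by_cases hyx : y = x
    · subst hyx
      rw [List.filter_cons_of_neg (by simp), List.find?_cons_of_neg (by simp [hx]), ih]
    · rw [List.filter_cons_of_pos (by simp [hyx])]
      cases hy : p y
      · rw [List.find?_cons_of_neg (by simp [hy]), List.find?_cons_of_neg (by simp [hy]), ih]
      · rw [List.find?_cons_of_pos hy, List.find?_cons_of_pos hy]

lemma pvFindHead (p : Char → Bool) :
    ∀ (n : Nat) (cs : List Char), cs.length ≤ n →
      cs.find? p = ((PySem.Set.ofList cs).filter p).head? := by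
  intro n
  induction n with
  | zero =>
    intro cs h
    have hnil : cs = [] := List.eq_nil_of_length_eq_zero (Nat.le_zero.1 h)
    subst hnil
    rfl
  | succ n ih =>
    intro cs h
    cases cs with
    | nil => rfl
    | cons x t =>
      rw [pvOfListCons]
      cases hx : p x
      · rw [List.find?_cons_of_neg (by simp [hx]), List.filter_cons_of_neg (by simp [hx])]
        have hlen : (t.filter (fun y => y != x)).length ≤ n :=
          le_trans (List.length_filter_le _ _) (Nat.le_of_succ_le_succ (by simpa using h))
        rw [← ih (t.filter (fun y => y != x)) hlen]
        exact (pvFindFilterNe p x hx t).symm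
      · rw [List.find?_cons_of_pos hx, List.filter_cons_of_pos hx]
        rfl

lemma pvParity (cs : List Char) : (pvOdds cs).length % 2 = cs.length % 2 := by
  classical
  have hnd : (pvOdds cs).Nodup := List.Nodup.filter _ (PySem.Set.nodup_ofList cs)
  have htf : (PySem.Set.ofList cs).toFinset = cs.toFinset := by
    ext a
    simp [PySem.Set.mem_ofList]
  have hcard : (pvOdds cs).length = (cs.toFinset.filter (fun a => cs.count a % 2 = 1)).card := by
    rw [← List.toFinset_card_of_nodup hnd]
    unfold pvOdds
    rw [List.toFinset_filter, htf]
    congr 1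
    ext a
    simp [pvOddP]
  rw [hcard]
  calc (cs.toFinset.filter (fun a => cs.count a % 2 = 1)).card % 2
      = (∑ a ∈ cs.toFinset, if cs.count a % 2 = 1 then 1 else 0) % 2 := by
        rw [Finset.card_filter]
    _ = (∑ a ∈ cs.toFinset, cs.count a % 2) % 2 := by
        congr 1
        apply Finset.sum_congr rfl
        intro a _
        rcases Nat.mod_two_eq_zero_or_one (cs.count a) with h | h <;> simp [h]
    _ = (∑ a ∈ cs.toFinset, cs.count a) % 2 := (Finset.sum_nat_mod _ _ _).symm
    _ = cs.length % 2 := by rw [List.sum_toFinset_count_eq_length]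

lemma pvFlatMapEraseNil (f : Char → List Char) (c : Char) (hfc : f c = []) :
    ∀ L : List Char, (L.erase c).flatMap f = L.flatMap f := by
  intro L
  induction L with
  | nil => rfl
  | cons y t ih =>
    by_cases hyc : y = c
    · subst hyc
      rw [List.erase_cons_head, List.flatMap_cons, hfc, List.nil_append]
    · rw [List.erase_cons_tail (by simp [hyc]), List.flatMap_cons, List.flatMap_cons, ih]

lemma pvHalfErase (cs : List Char) (c : Char) (hm : c ∈ cs) (hodd : cs.count c % 2 = 1) :
    pvHalf (cs.erase c) = pvHalf cs := by
  have hcount : ∀ x : Char, (cs.erase c).count x = cs.count x - (if c = x then 1 else 0) := by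
    intro x
    simpa using (List.count_erase (a := x) (b := c) (l := cs))
  have hrep : pvRep (cs.erase c) = pvRep cs := by
    funext x
    simp only [pvRep]
    congr 1
    rcases eq_or_ne x c with rfl | hxc
    · rw [hcount x, if_pos rfl]
      omega
    · rw [hcount x, if_neg (fun h => hxc h.symm)]
      omega
  unfold pvHalf
  rw [hrep]
  by_cases hc2 : c ∈ cs.erase c
  · have hperm : (PySem.Set.ofList (cs.erase c)).Perm (PySem.Set.ofList cs) := by
      rw [List.perm_ext_iff_of_nodup (PySem.Set.nodup_ofList _) (PySem.Set.nodup_ofList _)]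
      intro a
      rw [PySem.Set.mem_ofList, PySem.Set.mem_ofList]
      constructor
      · exact List.mem_of_mem_erase
      · intro ha
        rcases eq_or_ne a c with rfl | hac
        · exact hc2
        · exact (List.mem_erase_of_ne hac).2 ha
    rw [PySem.List.sorted_eq_sorted_of_perm _ _ _ (fun a b hab => hab) hperm]
  · have h1 : cs.count c = 1 := by
      have h0 : (cs.erase c).count c = 0 := List.count_eq_zero.2 hc2
      have h2 : 0 < cs.count c := List.count_pos_iff.2 hm
      rw [hcount c, if_pos rfl] at h0
      omega
    have hrepc : pvRep cs c = [] := by simp [pvRep, h1]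
    have hnds : (PySem.List.sorted (PySem.Set.ofList cs) (fun x => x)).Nodup :=
      ((PySem.List.sorted_perm _ _ _).nodup_iff).2 (PySem.Set.nodup_ofList cs)
    have hsorted : PySem.List.sorted (PySem.Set.ofList (cs.erase c)) (fun x => x)
        = (PySem.List.sorted (PySem.Set.ofList cs) (fun x => x)).erase c := by
      apply PySem.List.sorted_eq_of_perm_of_pairwise_lt
      · rw [List.perm_ext_iff_of_nodup (List.Nodup.erase c hnds) (PySem.Set.nodup_ofList _)]
        intro a
        rw [List.Nodup.mem_erase_iff hnds, PySem.List.mem_sorted, PySem.Set.mem_ofList,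
          PySem.Set.mem_ofList]
        constructor
        · rintro ⟨hac, hacs⟩
          exact (List.mem_erase_of_ne hac).2 hacs
        · intro ha
          have hac : a ≠ c := by
            rintro rfl
            exact hc2 ha
          exact ⟨hac, List.mem_of_mem_erase ha⟩
      · exact List.Pairwise.sublist List.erase_sublist (PySem.List.sorted_ofList_pairwise_lt cs)
    rw [hsorted, pvFlatMapEraseNil _ _ hrepc]

lemma pvFindErase (p p' : Char → Bool) (c a : Char)
    (hpp : ∀ x, x ≠ c → p' x = p x) (hpc : p c = true) :
    ∀ cs : List Char, cs.find? p = some a → a ≠ c → (cs.erase c).find? p' = some a := by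
  intro cs
  induction cs with
  | nil => intro h; simp at h
  | cons y t ih =>
    intro hf ha
    cases hy : p y
    · have hyc : y ≠ c := by
        rintro rfl
        rw [hpc] at hy
        exact Bool.noConfusion hy
      rw [List.find?_cons_of_neg (by simp [hy])] at hf
      rw [List.erase_cons_tail (by simp [hyc]), List.find?_cons_of_neg (by simp [hpp y hyc, hy])]
      exact ih hf ha
    · rw [List.find?_cons_of_pos hy] at hf
      have hya : y = a := Option.some.inj hf
      subst hya
      rw [List.erase_cons_tail (by simp [ha]), List.find?_cons_of_pos (by rw [hpp y ha]; exact hy)]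

lemma pvHeadNeLast (l : List Char) (hn : l.Nodup) (hl : 1 < l.length) (a c : Char)
    (ha : l.head? = some a) (hc : l.getLast? = some c) : a ≠ c := by
  cases l with
  | nil => simp at ha
  | cons x t =>
    cases t with
    | nil => simp at hl
    | cons y s =>
      have hax : a = x := by
        have hsx : some x = some a := by simpa using ha
        exact (Option.some.inj hsx).symm
      have hcm : c ∈ y :: s := by
        rw [List.getLast?_cons_cons] at hc
        have hg : (y :: s).getLast? = some ((y :: s).getLast (by simp)) :=
          List.getLast?_eq_some_getLast (by simp)
        rw [hg] at hc
        rw [← Option.some.inj hc]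
        exact List.getLast_mem _
      have hxns : x ∉ y :: s := (List.nodup_cons.1 hn).1
      rintro rfl
      rw [hax] at hcm
      exact hxns hcm

lemma pvGoEq : ∀ (n : Nat) (cs : List Char), cs.length = n → removeCharGo cs = removeCharAltGo cs := by
  intro n
  induction n using Nat.strong_induction_on with
  | _ n ih =>
    intro cs hlen
    have hodd := pvOddA_eq cs
    rw [removeCharGo, pvAltGo_eq]
    by_cases hbr : 1 < (pvOdds cs).length
    · rw [if_pos (by
        rw [hodd]
        exact Or.inl (show (1:Int) < (((pvOdds cs).length : Int), (pvOdds cs).getLast?).1 from by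
          show (1:Int) < ((pvOdds cs).length : Int)
          exact_mod_cast hbr))]
      split
      · next c heq =>
        have hcL : (pvOdds cs).getLast? = some c := by
          rw [hodd] at heq
          exact heq
        have hne : pvOdds cs ≠ [] := by
          intro h
          rw [h] at hbr
          simp at hbr
        have hcmem : c ∈ pvOdds cs := by
          have hg : (pvOdds cs).getLast? = some ((pvOdds cs).getLast hne) :=
            List.getLast?_eq_some_getLast hne
          rw [hg] at hcL
          rw [← Option.some.inj hcL]
          exact List.getLast_mem _
        obtain ⟨hc_in, hc_odd⟩ := List.mem_filter.1 hcmem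
        have hmc : c ∈ cs := (PySem.Set.mem_ofList _ _).1 hc_in
        have hoddc : cs.count c % 2 = 1 := by simpa [pvOddP] using hc_odd
        have hlt : (cs.erase c).length < n := by
          have h1 := List.length_erase_of_mem hmc
          have h2 := List.length_pos_of_mem hmc
          omega
        rw [ih _ hlt (cs.erase c) rfl, pvAltGo_eq, pvHalfErase cs c hmc hoddc]
        have hfh : cs.find? (pvOddP cs) = (pvOdds cs).head? :=
          pvFindHead (pvOddP cs) cs.length cs le_rfl
        have hne2 : pvOdds cs ≠ [] := hne
        obtain ⟨a, hah⟩ : ∃ a, (pvOdds cs).head? = some a := by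
          cases h : pvOdds cs with
          | nil => exact absurd h hne2
          | cons z zs => exact ⟨z, rfl⟩
        have hanec : a ≠ c :=
          pvHeadNeLast _ (List.Nodup.filter _ (PySem.Set.nodup_ofList cs)) hbr a c hah hcL
        have hfa : cs.find? (pvOddP cs) = some a := by rw [hfh]; exact hah
        have hpp : ∀ x, x ≠ c → pvOddP (cs.erase c) x = pvOddP cs x := by
          intro x hxc
          simp only [pvOddP]
          rw [List.count_erase_of_ne hxc]
        have hpc : pvOddP cs c = true := by simp [pvOddP, hoddc]
        have hfind' := pvFindErase (pvOddP cs) (pvOddP (cs.erase c)) c a hpp hpc cs hfa hanec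
        have hcen1 : pvCenter cs = [a] := by
          simp only [pvCenter, hfa]
        have hcen2 : pvCenter (cs.erase c) = [a] := by
          simp only [pvCenter, hfind']
        rw [hcen1, hcen2]
      · next heq =>
        exfalso
        rw [hodd] at heq
        have hnil : pvOdds cs = [] := List.getLast?_eq_none_iff.1 heq
        rw [hnil] at hbr
        simp at hbr
    · have hcond : ¬ (1 < (pvOddA cs).1 ∨ ((pvOddA cs).1 = 1 ∧ PySem.Int.mod (cs.length : Int) 2 = 0)) := by
        rw [hodd]
        rintro (h | ⟨h1, h2⟩)
        · have h' : (1:Int) < ((pvOdds cs).length : Int) := h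
          exact hbr (by exact_mod_cast h')
        · have h1' : ((pvOdds cs).length : Int) = 1 := h1
          have hl1 : (pvOdds cs).length = 1 := by exact_mod_cast h1'
          have hpar := pvParity cs
          rw [hl1] at hpar
          rw [pvMod2] at h2
          have hz : cs.length % 2 = 0 := by exact_mod_cast h2
          omega
      rw [if_neg hcond, hodd, pvHalvesA_eq]
      have hfh : cs.find? (pvOddP cs) = (pvOdds cs).head? :=
        pvFindHead (pvOddP cs) cs.length cs le_rfl
      have h01 : (pvOdds cs).length = 0 ∨ (pvOdds cs).length = 1 := by omega
      rcases h01 with h0 | h1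
      · have hnil : pvOdds cs = [] := List.eq_nil_of_length_eq_zero h0
        have hcen : pvCenter cs = [] := by
          simp only [pvCenter, hfh, hnil, List.head?_nil]
        rw [hcen]
        rw [if_neg (show ¬ ((((pvOdds cs).length : Int), (pvOdds cs).getLast?).1 = 1) from by
          show ¬ (((pvOdds cs).length : Int) = 1)
          rw [h0]
          norm_num)]
        simp
      · obtain ⟨c, hc⟩ := List.length_eq_one_iff.1 h1
        rw [if_pos (show ((((pvOdds cs).length : Int), (pvOdds cs).getLast?).1 = 1) from by
          show (((pvOdds cs).length : Int) = 1)
          rw [h1]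
          norm_num), hc]
        have hcen : pvCenter cs = [c] := by
          simp only [pvCenter, hfh, hc, List.head?_cons]
        rw [hcen]
        simp

-- ===== VERDICT (by name: the statement is the Claim_ definition above) =====
theorem remove_char_spec : Claim_equal_remove_char := by
  intro A _
  exact congrArg String.mk (pvGoEq A.toList.length A.toList rfl)
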